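-- pv_equiv track=rewrite | github.com/cirosantilli/project-euler-solutions | solvers/888.py | coeff_term_exact
-- ===== SOURCE A (Python) =====
-- import math
--
-- def coeff_term_exact(N: int, m: int, a: int) -> int:
--     """
--     Exact coefficient of x^m in (1-x)^(-a) * (1+x)^(-(N-a)).
--
--     Series:
--       (1-x)^(-t) = sum_{k>=0} C(t+k-1, k) x^k, with t=0 meaning 1
--       (1+x)^(-t) = sum_{k>=0} (-1)^k C(t+k-1, k) x^k, with t=0 meaning 1
--     """
--     A = a
--     B = N - a
--
--     def c_multiset(t: int, k: int) -> int:
--         if k == 0: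
--             return 1
--         if t == 0:
--             return 0
--         return math.comb(t + k - 1, k)
--
--     out = 0
--     for i in range(0, m + 1):
--         out += c_multiset(A, i) * ((-1) ** (m - i)) * c_multiset(B, m - i)
--     return out
-- ===== SOURCE B (Python) =====
-- def coeff_term_exact(N: int, m: int, a: int) -> int:
--     """
--     Exact coefficient of x^m in (1-x)^(-a) * (1+x)^(-(N-a)).
--
--     Different algorithm: f = (1-x)^(-a)(1+x)^(-b) satisfies the ODE
--     (1-x^2) f' = ((a-b) + (a+b)x) f, giving the holonomic three-term
--     recurrence (k+1) c_{k+1} = (a-b) c_k + (a+b+k-1) c_{k-1} on the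
--     coefficients themselves; no binomial coefficients are computed.
--     The division is exact, so // is exact integer arithmetic.
--     """
--     b = N - a
--     if m < 0:
--         return 0
--     prev, cur = 0, 1  # c_{-1} = 0, c_0 = 1
--     for k in range(m):
--         prev, cur = cur, ((a - b) * cur + (a + b + k - 1) * prev) // (k + 1)
--     return cur
-- ===== Notes on version B (the rewrite author's own statement) =====
-- stated objective: faster
-- what changed: A sums the full convolution of the two series' binomial coefficients (math.comb per term); B computes no binomials at all: from the ODE (1-x^2)f' = ((a-b)+(a+b)x)f it runs the holonomic three-term recurrence (k+1)c_{k+1} = (a-b)c_k + (a+b+k-1)c_{k-1} on the target coefficients, one O(m) pass with exact integer division.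
import Mathlib
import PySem

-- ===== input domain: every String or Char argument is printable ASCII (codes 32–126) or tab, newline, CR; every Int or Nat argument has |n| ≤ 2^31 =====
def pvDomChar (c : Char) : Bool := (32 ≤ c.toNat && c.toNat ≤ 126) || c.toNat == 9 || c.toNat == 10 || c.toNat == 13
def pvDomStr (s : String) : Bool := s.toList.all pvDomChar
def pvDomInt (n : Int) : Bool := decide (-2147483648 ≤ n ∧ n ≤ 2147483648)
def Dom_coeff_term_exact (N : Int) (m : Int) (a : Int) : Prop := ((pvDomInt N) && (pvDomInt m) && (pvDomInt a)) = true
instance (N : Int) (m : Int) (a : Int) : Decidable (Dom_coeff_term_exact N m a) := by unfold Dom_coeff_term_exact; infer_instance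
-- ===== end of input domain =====

-- B replaces A's binomial convolution by the holonomic three-term recurrence on the
-- coefficients themselves (return value only; no mutation).

-- ===== PORT A =====
-- math.comb t+k-1 k for 0 ≤ t+k-1, 0 ≤ k (Pre_ excludes the inputs where math.comb raises on a negative argument)
def pvCMultiset (t : Int) (k : Int) : Int :=
  if k = 0 then 1
  else if t = 0 then 0
  else ((t + k - 1).toNat.choose k.toNat : Int)

def coeff_term_exact (N : Int) (m : Int) (a : Int) : Int :=
  let A := a
  let B := N - a
  (PySem.List.pyRange 0 (m + 1) 1).foldl
    (fun out i => out + pvCMultiset A i * (-1 : Int) ^ (m - i).toNat * pvCMultiset B (m - i)) 0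

-- ===== PORT B =====
-- holonomic recurrence (k+1) c_{k+1} = (a-b) c_k + (a+b+k-1) c_{k-1}; state = (c_{k-1}, c_k)
def coeff_term_exact_alt (N : Int) (m : Int) (a : Int) : Int :=
  let b := N - a
  if m < 0 then 0
  else
    ((PySem.List.pyRange 0 m 1).foldl
      (fun (s : Int × Int) k =>
        (s.2, PySem.Int.floordiv ((a - b) * s.2 + (a + b + k - 1) * s.1) (k + 1)))
      (0, 1)).2

-- ===== PRECONDITION & SPEC =====
-- Pre_ excludes exactly the inputs (m ≥ 1 with a < 0 or N - a < 0) where A's math.comb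
-- raises ValueError on a negative argument; A returns on every other input.
def Pre_coeff_term_exact (N : Int) (m : Int) (a : Int) : Prop :=
  m < 1 ∨ (0 ≤ a ∧ 0 ≤ N - a)
instance (N : Int) (m : Int) (a : Int) : Decidable (Pre_coeff_term_exact N m a) := by
  unfold Pre_coeff_term_exact; infer_instance

def pvWitness_coeff_term_exact : Int × Int × Int := (2, 3, 1)

def Spec_coeff_term_exact (N : Int) (m : Int) (a : Int) (out : Int) : Prop := out = coeff_term_exact_alt N m a
instance (N : Int) (m : Int) (a : Int) (out : Int) : Decidable (Spec_coeff_term_exact N m a out) := by unfold Spec_coeff_term_exact; infer_instance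

-- ===== CLAIM (what is proved, stated in full; the proofs are below) =====
def Claim_equal_coeff_term_exact : Prop := ∀ (N : Int) (m : Int) (a : Int), Dom_coeff_term_exact N m a → Pre_coeff_term_exact N m a → Spec_coeff_term_exact N m a (coeff_term_exact N m a)

-- ===== LEMMAS AND PROOFS =====

-- C(t+k-1, k) over Int (the multiset coefficient), for 0 ≤ t
def pvChi (t : Int) (k : Nat) : Int := (((t + k - 1).toNat.choose k : Nat) : Int)

-- signed coefficient of x^j in (1+x)^(-b)
def pvV (b : Int) (j : Nat) : Int := (-1 : Int) ^ j * pvChi b j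

-- coefficient of x^k in the product: the convolution
def pvC (a b : Int) (k : Nat) : Int := ∑ i ∈ Finset.range (k + 1), pvChi a i * pvV b (k - i)

-- c_{k-1} with c_{-1} = 0
def pvPC (a b : Int) : Nat → Int
  | 0 => 0
  | k + 1 => pvC a b k

-- i-weighted and (n-i)-weighted convolutions
def pvP (a b : Int) (n : Nat) : Int :=
  ∑ i ∈ Finset.range (n + 1), (i : Int) * (pvChi a i * pvV b (n - i))
def pvQ (a b : Int) (n : Nat) : Int :=
  ∑ i ∈ Finset.range (n + 1), ((n : Int) - (i : Int)) * (pvChi a i * pvV b (n - i))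

theorem pvCMultiset_eq (t : Int) (ht : 0 ≤ t) (k : Nat) : pvCMultiset t (k : Int) = pvChi t k := by
  unfold pvCMultiset
  by_cases hk : k = 0
  · subst hk; simp [pvChi]
    
  · have hk' : ((k : Int)) ≠ 0 := by exact_mod_cast hk
    rw [if_neg hk']
    by_cases ht0 : t = 0
    · rw [if_pos ht0]; subst ht0
      unfold pvChi
      rw [show ((0 : Int) + (k : Int) - 1).toNat = k - 1 by omega,
          Nat.choose_eq_zero_of_lt (by omega : k - 1 < k)]
      simp
    · rw [if_neg ht0]
      unfold pvChi
      rw [Int.toNat_natCast]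

theorem pvChi_mul (t : Int) (ht : 0 ≤ t) (k : Nat) :
    pvChi t k * (t + k) = ((k : Int) + 1) * pvChi t (k + 1) := by
  obtain ⟨b, rfl⟩ := Int.eq_ofNat_of_zero_le ht
  rcases Nat.eq_zero_or_pos (b + k) with h | h
  · obtain ⟨hb, hk⟩ : b = 0 ∧ k = 0 := by omega
    subst hb; subst hk; decide
  · have h1 : ((b : Int) + (k : Int) - 1).toNat = b + k - 1 := by omega
    have h2 : ((b : Int) + ((k + 1 : Nat) : Int) - 1).toNat = b + k := by push_cast; omega
    have hnat : (b + k) * Nat.choose (b + k - 1) k = Nat.choose (b + k) (k + 1) * (k + 1) := by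
      have := Nat.add_one_mul_choose_eq (b + k - 1) k
      simpa [Nat.succ_eq_add_one, Nat.sub_add_cancel h] using this
    have hInt := congrArg (fun x : Nat => (x : Int)) hnat
    push_cast at hInt
    simp only [pvChi, h1, h2]
    linear_combination hInt

theorem pvV_mul (b : Int) (hb : 0 ≤ b) (j : Nat) :
    ((j : Int) + 1) * pvV b (j + 1) = -(b + j) * pvV b j := by
  unfold pvV
  have h := pvChi_mul b hb j
  calc ((j : Int) + 1) * ((-1 : Int) ^ (j + 1) * pvChi b (j + 1))
      = (-1 : Int) ^ (j + 1) * (((j : Int) + 1) * pvChi b (j + 1)) := by ring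
    _ = (-1 : Int) ^ (j + 1) * (pvChi b j * (b + j)) := by rw [← h]
    _ = -(b + j) * ((-1 : Int) ^ j * pvChi b j) := by rw [pow_succ]; ring

theorem pvPQ_sum (a b : Int) (n : Nat) : pvP a b n + pvQ a b n = (n : Int) * pvC a b n := by
  unfold pvP pvQ pvC
  rw [← Finset.sum_add_distrib, Finset.mul_sum]
  exact Finset.sum_congr rfl (fun i _ => by ring)

theorem pvP_step (a b : Int) (ha : 0 ≤ a) (n : Nat) :
    pvP a b (n + 1) = a * pvC a b n + pvP a b n := by
  unfold pvP
  rw [Finset.sum_range_succ']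
  simp only [Nat.cast_zero, zero_mul, add_zero, Nat.add_sub_add_right]
  have hterm : ∀ i ∈ Finset.range (n + 1),
      ((i + 1 : Nat) : Int) * (pvChi a (i + 1) * pvV b (n - i))
        = a * (pvChi a i * pvV b (n - i)) + (i : Int) * (pvChi a i * pvV b (n - i)) := by
    intro i _
    have h := pvChi_mul a ha i
    push_cast
    calc ((i : Int) + 1) * (pvChi a (i + 1) * pvV b (n - i))
        = (((i : Int) + 1) * pvChi a (i + 1)) * pvV b (n - i) := by ring
      _ = (pvChi a i * (a + i)) * pvV b (n - i) := by rw [← h]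
      _ = a * (pvChi a i * pvV b (n - i)) + (i : Int) * (pvChi a i * pvV b (n - i)) := by ring
  rw [Finset.sum_congr rfl hterm, Finset.sum_add_distrib, ← Finset.mul_sum]
  rfl

theorem pvQ_step (a b : Int) (hb : 0 ≤ b) (n : Nat) :
    pvQ a b (n + 1) = -b * pvC a b n - pvQ a b n := by
  unfold pvQ
  rw [Finset.sum_range_succ]
  have h0 : (((n + 1 : Nat) : Int) - ((n + 1 : Nat) : Int)) * (pvChi a (n + 1) * pvV b (n + 1 - (n + 1))) = 0 := by
    ring_nf
  rw [h0, add_zero]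
  have hterm : ∀ i ∈ Finset.range (n + 1),
      (((n + 1 : Nat) : Int) - (i : Int)) * (pvChi a i * pvV b (n + 1 - i))
        = -b * (pvChi a i * pvV b (n - i)) - ((n : Int) - (i : Int)) * (pvChi a i * pvV b (n - i)) := by
    intro i hi
    have hin : i ≤ n := Nat.lt_succ_iff.mp (Finset.mem_range.mp hi)
    have hsub : n + 1 - i = (n - i) + 1 := by omega
    have hcast : ((n + 1 : Nat) : Int) - (i : Int) = ((n - i : Nat) : Int) + 1 := by
      have : ((n - i : Nat) : Int) = (n : Int) - (i : Int) := by
        omega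
      rw [this]; push_cast; ring
    have h := pvV_mul b hb (n - i)
    have hni : ((n - i : Nat) : Int) = (n : Int) - (i : Int) := by omega
    calc (((n + 1 : Nat) : Int) - (i : Int)) * (pvChi a i * pvV b (n + 1 - i))
        = pvChi a i * ((((n - i : Nat) : Int) + 1) * pvV b ((n - i) + 1)) := by
          rw [hcast, hsub]; ring
      _ = pvChi a i * (-(b + ((n - i : Nat) : Int)) * pvV b (n - i)) := by rw [h]
      _ = -b * (pvChi a i * pvV b (n - i)) - ((n : Int) - (i : Int)) * (pvChi a i * pvV b (n - i)) := by
          rw [hni]; ring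
  rw [Finset.sum_congr rfl hterm, Finset.sum_sub_distrib, ← Finset.mul_sum]
  rfl

theorem pvP_zero (a b : Int) : pvP a b 0 = 0 := by simp [pvP]
theorem pvQ_zero (a b : Int) : pvQ a b 0 = 0 := by simp [pvQ]

theorem pvPQ_diff (a b : Int) (ha : 0 ≤ a) (hb : 0 ≤ b) (n : Nat) :
    pvP a b (n + 1) - pvQ a b (n + 1) = (a + b + n) * pvC a b n := by
  rw [pvP_step a b ha n, pvQ_step a b hb n]
  have h := pvPQ_sum a b n
  linarith [h]

-- the holonomic recurrence: (k+1) c_{k+1} = (a-b) c_k + (a+b+k-1) c_{k-1}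
theorem pvC_rec (a b : Int) (ha : 0 ≤ a) (hb : 0 ≤ b) (k : Nat) :
    ((k : Int) + 1) * pvC a b (k + 1)
      = (a - b) * pvC a b k + (a + b + (k : Int) - 1) * pvPC a b k := by
  have hsum := pvPQ_sum a b (k + 1)
  have hcast : ((k + 1 : Nat) : Int) = (k : Int) + 1 := by push_cast; ring
  rw [hcast] at hsum
  rw [← hsum, pvP_step a b ha k, pvQ_step a b hb k]
  cases k with
  | zero => rw [pvP_zero, pvQ_zero]; simp [pvPC]; ring
  | succ k' =>
    have hd := pvPQ_diff a b ha hb k'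
    have hpc : pvPC a b (k' + 1) = pvC a b k' := rfl
    rw [hpc]
    push_cast
    linarith [hd]

theorem pvC_zero (a b : Int) : pvC a b 0 = 1 := by
  simp [pvC, pvV, pvChi]

-- B's loop invariant: after iterating k = 0..j-1 the state is (c_{j-1}, c_j)
theorem pv_B_loop (a b : Int) (ha : 0 ≤ a) (hb : 0 ≤ b) (j : Nat) :
    (PySem.List.pyRange 0 (j : Int) 1).foldl
      (fun (s : Int × Int) k =>
        (s.2, PySem.Int.floordiv ((a - b) * s.2 + (a + b + k - 1) * s.1) (k + 1)))
      (0, 1)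
    = (pvPC a b j, pvC a b j) := by
  induction j with
  | zero =>
    rw [Nat.cast_zero, show PySem.List.pyRange 0 (0 : Int) 1 = [] from by decide]
    simp [pvPC, pvC_zero]
  | succ j ih =>
    have hcast : ((j + 1 : Nat) : Int) = (j : Int) + 1 := by push_cast; ring
    rw [hcast, PySem.List.pyRange_one_succ_right (by positivity), List.foldl_append, ih]
    simp only [List.foldl_cons, List.foldl_nil]
    have hrec := pvC_rec a b ha hb j
    have hdiv : PySem.Int.floordiv ((a - b) * pvC a b j + (a + b + (j : Int) - 1) * pvPC a b j) ((j : Int) + 1)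
        = pvC a b (j + 1) := by
      rw [← hrec, PySem.Int.floordiv_eq_ediv_of_pos (by positivity)]
      exact Int.mul_ediv_cancel_left _ (by positivity)
    rw [hdiv]
    rfl

-- list-sum ↔ finset-sum bridge
theorem pv_list_finset_sum (f : Nat → Int) (n : Nat) :
    ((List.range n).map f).sum = ∑ i ∈ Finset.range n, f i := by
  induction n with
  | zero => simp
  | succ n ih => rw [List.range_succ, List.map_append, List.sum_append, Finset.sum_range_succ, ih]; simp

-- A's loop is the convolution sum
theorem pv_A_eval (N a : Int) (ha : 0 ≤ a) (hb : 0 ≤ N - a) (n : Nat) :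
    coeff_term_exact N (n : Int) a = pvC a (N - a) n := by
  unfold coeff_term_exact
  have hcast : ((n : Int) + 1) = ((n + 1 : Nat) : Int) := by push_cast; ring
  rw [hcast, PySem.List.pyRange_zero_natCast, List.foldl_map, PySem.List.foldl_add, zero_add,
      pv_list_finset_sum]
  unfold pvC
  apply Finset.sum_congr rfl
  intro i hi
  have hin : i < n + 1 := Finset.mem_range.mp hi
  have h1 : ((n : Int) - (i : Int)).toNat = n - i := by omega
  have h2 : ((n : Int) - (i : Int)) = ((n - i : Nat) : Int) := by omega
  rw [h2, pvCMultiset_eq a ha i, pvCMultiset_eq (N - a) hb (n - i), Int.toNat_natCast]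
  unfold pvV
  ring

theorem pv_B_eval (N a : Int) (ha : 0 ≤ a) (hb : 0 ≤ N - a) (n : Nat) :
    coeff_term_exact_alt N (n : Int) a = pvC a (N - a) n := by
  unfold coeff_term_exact_alt
  have hm : ¬ ((n : Int) < 0) := by omega
  simp only [hm, if_false]
  rw [pv_B_loop a (N - a) ha hb n]

theorem pv_m_neg (N m a : Int) (hm : m < 0) :
    coeff_term_exact N m a = coeff_term_exact_alt N m a := by
  unfold coeff_term_exact coeff_term_exact_alt
  have h : PySem.List.pyRange 0 (m + 1) 1 = PySem.List.pyRange 0 0 1 := by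
    rw [PySem.List.pyRange_one_eq_nil (by omega), PySem.List.pyRange_one_eq_nil (by omega)]
  simp [h, hm, PySem.List.pyRange_one_eq_nil (by omega : (0:Int) ≤ 0)]

theorem pv_m_zero (N a : Int) :
    coeff_term_exact N 0 a = coeff_term_exact_alt N 0 a := by
  have hA0 : ∀ t : Int, pvCMultiset t 0 = 1 := by intro t; simp [pvCMultiset]
  unfold coeff_term_exact coeff_term_exact_alt
  rw [show PySem.List.pyRange 0 ((0 : Int) + 1) 1 = [0] from by decide,
      show PySem.List.pyRange 0 (0 : Int) 1 = [] from by decide]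
  simp [hA0]

-- ===== VERDICT (by name: the statement is the Claim_ definition above) =====
theorem coeff_term_exact_spec : Claim_equal_coeff_term_exact := by
  intro N m a _ hpre
  unfold Spec_coeff_term_exact
  rcases lt_trichotomy m 0 with hm | hm | hm
  · exact pv_m_neg N m a hm
  · subst hm; exact pv_m_zero N a
  · rcases hpre with h1 | ⟨ha, hb⟩
    · omega
    · obtain ⟨n, rfl⟩ := Int.eq_ofNat_of_zero_le (le_of_lt hm)
      rw [pv_A_eval N a ha hb n, pv_B_eval N a ha hb n]
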